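-- pv_equiv track=rewrite | github.com/hwanginbeom/algorithm_study | 2.algorithm_test/21.04.12/21.04.11_wooseok.py | solution
-- ===== SOURCE A (Python) =====
-- from itertools import combinations
--
-- def solution(relation):
--     answer = 0
--
--     row = len(relation)
--     col = len(relation[0])
--
--     # 전체 조합
--     all_candi_list = []
--     for i in range(1, col + 1) :
--         all_candi_list.extend(combinations(range(col), i))
--
--     # 유일성
--     unique_list = []
--     for candi in all_candi_list :
--         temp = [tuple([item[i] for i in candi]) for item in relation]
--
--         if len(set(temp)) == row :
--             unique_list.append(candi)
--
--     # 최소성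
--     answer = set(unique_list)
--     for i in range(len(unique_list)) :
--         for j in range(i + 1, len(unique_list)) :
--             # 최소성을 구하는 로직
--             # 유일성을 가지고 있는 튜플이 다른 튜플에 포함되어 있으면, 제거하는 형식
--             if len(unique_list[i]) == len(set(unique_list[i]) & set(unique_list[j])) :
--                 answer.discard(unique_list[j])
--
--     return len(answer)
-- ===== SOURCE B (Python) =====
-- from itertools import combinations
--
-- def solution(relation):
--     row = len(relation)
--     col = len(relation[0])
--     # distinct pairwise "difference sets": columns on which two rows disagree.
--     # A column set is unique iff it intersects every difference set (hitting set),
--     # and minimal iff additionally no single-column removal (to a nonempty set) still hits.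
--     diffs = []
--     for a in range(row):
--         for b in range(a + 1, row):
--             d = [c for c in range(col) if relation[a][c] != relation[b][c]]
--             if d not in diffs:
--                 diffs.append(d)
--
--     def hits(cols):
--         return all(any(c in d for c in cols) for d in diffs)
--
--     count = 0
--     for size in range(1, col + 1):
--         for candi in combinations(range(col), size):
--             if hits(candi) and all(size == 1 or not hits([x for x in candi if x != c])
--                                    for c in candi):
--                 count += 1
--     return count
-- ===== Notes on version B (the rewrite author's own statement) =====
-- stated objective: faster
-- what changed: B replaces A's projection-based uniqueness test and pairwise candidate-pruning pass by the difference-set characterization: it computes once the distinct column sets on which each pair of rows differs, tests a candidate by whether it hits every difference set, and decides minimality locally by checking that no single-column removal still hits (valid since hitting is monotone), so candidates are judged independently with no set-of-projected-tuples and no candidate-vs-candidate subset pass.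
import Mathlib
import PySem

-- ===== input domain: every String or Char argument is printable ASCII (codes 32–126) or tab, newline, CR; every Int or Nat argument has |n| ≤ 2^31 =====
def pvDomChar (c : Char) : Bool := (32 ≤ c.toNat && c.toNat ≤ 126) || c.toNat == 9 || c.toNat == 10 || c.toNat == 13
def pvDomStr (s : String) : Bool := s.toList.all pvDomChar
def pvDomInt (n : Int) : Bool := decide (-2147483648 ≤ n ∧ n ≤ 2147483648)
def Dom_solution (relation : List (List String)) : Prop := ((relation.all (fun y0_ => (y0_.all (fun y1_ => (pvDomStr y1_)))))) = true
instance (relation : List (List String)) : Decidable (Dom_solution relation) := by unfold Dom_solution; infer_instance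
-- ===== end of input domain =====

-- B replaces A's projection-uniqueness test and pairwise candidate-pruning pass by the
-- difference-set (agree-set) characterization: a candidate is a key iff it hits every pairwise
-- row-difference set, and minimal iff no single-column removal still hits.  Return value only.

-- ===== PORT A =====
def solution (relation : List (List String)) : Int :=
  let row := PySem.List.len relation
  let col := PySem.List.len (PySem.List.pyGetD relation 0 [])
  let allCandiList := (PySem.List.pyRange 1 (col + 1) 1).foldl
      (fun acc i => acc ++ PySem.List.combinations (PySem.List.pyRange 0 col 1) i.toNat) []
  let uniqueList := allCandiList.foldl
      (fun acc candi =>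
        if PySem.Set.len (PySem.Set.ofList (relation.map
              (fun item => candi.map (fun i => PySem.List.pyGetD item i "")))) == row
        then acc ++ [candi] else acc) []
  let answer0 := PySem.Set.ofList uniqueList
  let answer := (PySem.List.pyRange 0 (PySem.List.len uniqueList) 1).foldl (fun ans i =>
      (PySem.List.pyRange (i + 1) (PySem.List.len uniqueList) 1).foldl (fun ans j =>
        if PySem.List.len (PySem.List.pyGetD uniqueList i []) ==
            PySem.Set.len (PySem.Set.inter
              (PySem.Set.ofList (PySem.List.pyGetD uniqueList i []))
              (PySem.Set.ofList (PySem.List.pyGetD uniqueList j [])))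
        then PySem.Set.discard ans (PySem.List.pyGetD uniqueList j []) else ans) ans) answer0
  PySem.Set.len answer

-- ===== PORT B =====
-- helper for B: hits(cols) = all(any(c in d for c in cols) for d in diffs)
def bHits (diffs : List (List Int)) (cols : List Int) : Bool :=
  diffs.all (fun d => cols.any (fun c => d.contains c))

def solution_alt (relation : List (List String)) : Int :=
  let row := PySem.List.len relation
  let col := PySem.List.len (PySem.List.pyGetD relation 0 [])
  let diffs := (PySem.List.pyRange 0 row 1).foldl (fun diffs a =>
      (PySem.List.pyRange (a + 1) row 1).foldl (fun diffs b =>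
        let d := (PySem.List.pyRange 0 col 1).filter (fun c =>
            !(PySem.List.pyGetD (PySem.List.pyGetD relation a []) c "" ==
              PySem.List.pyGetD (PySem.List.pyGetD relation b []) c ""))
        if diffs.contains d then diffs else diffs ++ [d]) diffs) []
  (PySem.List.pyRange 1 (col + 1) 1).foldl (fun count size =>
      (PySem.List.combinations (PySem.List.pyRange 0 col 1) size.toNat).foldl (fun count candi =>
        if bHits diffs candi &&
            candi.all (fun c =>
              (size == 1) || !(bHits diffs (candi.filter (fun x => !(x == c)))))
        then count + 1 else count) count) 0

-- ===== PRECONDITION & SPEC =====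
-- Pre_ excludes exactly the inputs on which the Python A raises IndexError: an empty relation
-- (relation[0]) and relations where some row is shorter than the first row (item[i] in the
-- projection); A returns normally on every other input.
def Pre_solution (relation : List (List String)) : Prop :=
  relation ≠ [] ∧ ∀ r ∈ relation, (relation.headD []).length ≤ r.length
instance (relation : List (List String)) : Decidable (Pre_solution relation) := by
  unfold Pre_solution; infer_instance

def pvWitness_solution : List (List String) := [["a", "b"], ["a", "c"]]

def Spec_solution (relation : List (List String)) (out : Int) : Prop := out = solution_alt relation
instance (relation : List (List String)) (out : Int) : Decidable (Spec_solution relation out) := by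
  unfold Spec_solution; infer_instance

-- ===== CLAIM (what is proved, stated in full; the proofs are below) =====
def Claim_equal_solution : Prop := ∀ (relation : List (List String)), Dom_solution relation → Pre_solution relation → Spec_solution relation (solution relation)

-- ===== LEMMAS AND PROOFS =====

-- proof-side names for the pipeline pieces
def pvUniq (relation : List (List String)) (candi : List Int) : Bool :=
  PySem.Set.len (PySem.Set.ofList (relation.map
    (fun item => candi.map (fun i => PySem.List.pyGetD item i "")))) == PySem.List.len relation

def pvCol (relation : List (List String)) : Int :=
  PySem.List.len (PySem.List.pyGetD relation 0 [])

def pvSub (x y : List Int) : Bool := PySem.Set.issubset x y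

def pvR (col : Int) : List Int := PySem.List.pyRange 0 col 1

def pvL (col : Int) : List (List Int) :=
  (PySem.List.pyRange 1 (col + 1) 1).flatMap
    (fun i => PySem.List.combinations (pvR col) i.toNat)

def pvU (relation : List (List String)) : List (List Int) :=
  (pvL (pvCol relation)).filter (pvUniq relation)

-- greedy keep count: c contributes 1 iff no previously seen element is a subset of it
def pvH : List (List Int) → List (List Int) → Nat
  | _, [] => 0
  | seen, c :: rest =>
      (if seen.any (fun x => pvSub x c) then 0 else 1) + pvH (seen ++ [c]) rest

def pvKeepB (U : List (List Int)) (z : List Int) : Bool :=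
  (List.range U.length).all (fun q => (List.range q).all (fun p =>
    !(pvSub (U.getD p []) (U.getD q [])) || !(U.getD q [] == z)))

-- the semantic "key" predicate: cols hits every pairwise row-difference set
def pvHits (relation : List (List String)) (cols : List Int) : Prop :=
  ∀ b : Nat, b < relation.length → ∀ a : Nat, a < b →
    ∃ c ∈ cols, PySem.List.pyGetD (relation.getD a []) c "" ≠
      PySem.List.pyGetD (relation.getD b []) c ""

def pvHitsB (relation : List (List String)) (cols : List Int) : Bool :=
  (List.range relation.length).all (fun b => (List.range b).all (fun a =>
    cols.any (fun c => !(PySem.List.pyGetD (relation.getD a []) c "" ==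
      PySem.List.pyGetD (relation.getD b []) c ""))))

lemma pvHitsB_iff (relation : List (List String)) (cols : List Int) :
    pvHitsB relation cols = true ↔ pvHits relation cols := by
  unfold pvHitsB pvHits
  simp only [List.all_eq_true, List.mem_range, List.any_eq_true, Bool.not_eq_true',
    beq_eq_false_iff_ne]

lemma pvHitsB_false_iff (relation : List (List String)) (cols : List Int) :
    pvHitsB relation cols = false ↔ ¬ pvHits relation cols := by
  rw [Bool.eq_false_iff]
  exact not_congr (pvHitsB_iff relation cols)

-- ---------------------------------------------------------------- A-side machinery

lemma pvKeepB_iff (U : List (List Int)) (z : List Int) :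
    pvKeepB U z = true ↔
      ∀ q, q < U.length → ∀ p, p < q →
        pvSub (U.getD p []) (U.getD q []) = true → U.getD q [] ≠ z := by
  simp only [pvKeepB, List.all_eq_true, List.mem_range, Bool.or_eq_true, Bool.not_eq_true',
    beq_eq_false_iff_ne]
  constructor
  · intro h q hq p hp hsub heq
    rcases h q hq p hp with h' | h'
    · rw [hsub] at h'; cases h'
    · exact h' heq
  · intro h q hq p hp
    by_cases hsub : pvSub (U.getD p []) (U.getD q []) = true
    · exact Or.inr (h q hq p hp hsub)
    · exact Or.inl (by simpa using hsub)

lemma pvFoldl_filter_step {α β : Type} (p : α → Bool) (g : β → α → β) (l : List α) (init : β) :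
    l.foldl (fun s c => if p c = true then g s c else s) init = (l.filter p).foldl g init := by
  induction l generalizing init with
  | nil => rfl
  | cons c l ih =>
    by_cases h : p c = true <;> simp [h, ih]

lemma pvFoldl_discard (C : Int → Bool) (u : Int → List Int) (J : List Int)
    (s : List (List Int)) :
    J.foldl (fun ans j => if C j = true then PySem.Set.discard ans (u j) else ans) s
      = s.filter (fun z => J.all (fun j => !(C j) || !(z == u j))) := by
  induction J generalizing s with
  | nil => simp
  | cons j J ih =>
    rw [List.foldl_cons, ih]
    by_cases h : C j = true
    · rw [if_pos h]
      show (List.filter _ s).filter _ = _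
      rw [List.filter_filter]
      apply List.filter_congr
      intro z _
      simp [List.all_cons, h, Bool.and_comm]
    · rw [if_neg h]
      apply List.filter_congr
      intro z _
      have hC : C j = false := by simpa using h
      simp [List.all_cons, hC]

lemma pvFoldl_filter_all {α : Type} (P : Int → α → Bool) (I : List Int) (s : List α) :
    I.foldl (fun ans i => ans.filter (P i)) s = s.filter (fun z => I.all (fun i => P i z)) := by
  induction I generalizing s with
  | nil => simp
  | cons i I ih =>
    rw [List.foldl_cons, ih, List.filter_filter]
    apply List.filter_congr
    intro z _
    simp [List.all_cons, Bool.and_comm]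

lemma pvNodup_combinations {α : Type} [DecidableEq α] (xs : List α) (r : Nat) (h : xs.Nodup) :
    (PySem.List.combinations xs r).Nodup := by
  induction xs generalizing r with
  | nil =>
    cases r with
    | zero => rw [PySem.List.combinations_zero]; exact List.nodup_singleton _
    | succ r => rw [PySem.List.combinations_nil_succ]; exact List.nodup_nil
  | cons x xs ih =>
    cases r with
    | zero => rw [PySem.List.combinations_zero]; exact List.nodup_singleton _
    | succ r =>
      rw [PySem.List.combinations_cons_succ]
      rcases List.nodup_cons.mp h with ⟨hx, hxs⟩
      refine List.Nodup.append ((ih r hxs).map ?_) (ih (r + 1) hxs) ?_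
      · intro a b hab
        exact (List.cons_eq_cons.mp hab).2
      · intro c hc1 hc2
        rcases List.mem_map.mp hc1 with ⟨d, _, rfl⟩
        have hsub := PySem.List.sublist_of_mem_combinations hc2
        exact hx (hsub.subset List.mem_cons_self)

lemma pvSizes (n : Nat) :
    PySem.List.pyRange 1 ((n : Int) + 1) 1
      = (List.range n).map (fun k : Nat => 1 + (k : Int)) := by
  rcases Nat.eq_zero_or_pos n with h | h
  · subst h; simp [PySem.List.pyRange]
  · have h2 : (1 : Int) < (n : Int) + 1 := by
      have : (0 : Int) < (n : Int) := by exact_mod_cast h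
      omega
    simp only [PySem.List.pyRange, if_neg (by norm_num : ¬(1:Int) = 0),
      if_pos (by norm_num : (0:Int) < 1), if_pos h2]
    have h3 : ((n : Int) + 1 - 1 + 1 - 1) / 1 = (n : Int) := by omega
    rw [h3, Int.toNat_natCast]
    apply List.map_congr_left
    intro k _
    omega

lemma pvR_nodup (n : Nat) : (pvR (n : Int)).Nodup := by
  rw [pvR, PySem.List.pyRange_zero_natCast]
  exact (List.nodup_range).map (fun a b hab => by exact_mod_cast hab)

lemma pvL_elem_sublist (n : Nat) : ∀ c ∈ pvL (n : Int), c.Sublist (pvR (n : Int)) := by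
  intro c hc
  rcases List.mem_flatMap.mp hc with ⟨i, _, hci⟩
  exact PySem.List.sublist_of_mem_combinations hci

lemma pvL_elem_nodup (n : Nat) : ∀ c ∈ pvL (n : Int), c.Nodup := by
  intro c hc
  exact (pvL_elem_sublist n c hc).nodup (pvR_nodup n)

lemma pvL_nodup (n : Nat) : (pvL (n : Int)).Nodup := by
  unfold pvL
  rw [List.nodup_flatMap]
  constructor
  · intro i _
    exact pvNodup_combinations _ _ (pvR_nodup n)
  · rw [pvSizes, List.pairwise_map]
    refine List.Pairwise.imp_of_mem ?_ List.pairwise_lt_range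
    intro a b _ _ hab
    simp only [Function.onFun]
    intro c hc1 hc2
    have l1 := PySem.List.length_of_mem_combinations hc1
    have l2 := PySem.List.length_of_mem_combinations hc2
    omega

lemma pvL_len_mono (n : Nat) :
    (pvL (n : Int)).Pairwise (fun a b => a.length ≤ b.length) := by
  unfold pvL
  rw [List.pairwise_flatMap]
  constructor
  · intro i _
    refine List.pairwise_of_forall_mem_list ?_
    intro a ha b hb
    have l1 := PySem.List.length_of_mem_combinations ha
    have l2 := PySem.List.length_of_mem_combinations hb
    omega
  · rw [pvSizes, List.pairwise_map]
    refine List.Pairwise.imp_of_mem ?_ List.pairwise_lt_range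
    intro a b _ _ hab c hc1 d hd2
    have l1 := PySem.List.length_of_mem_combinations hc1
    have l2 := PySem.List.length_of_mem_combinations hd2
    omega

lemma pvCol_natCast (relation : List (List String)) :
    pvCol relation = (((PySem.List.pyGetD relation 0 []).length : Nat) : Int) :=
  PySem.List.len_eq _

lemma pvU_elem_nodup (relation : List (List String)) : ∀ c ∈ pvU relation, c.Nodup := by
  intro c hc
  have hm : c ∈ pvL (pvCol relation) := List.mem_of_mem_filter hc
  rw [pvCol_natCast] at hm
  exact pvL_elem_nodup _ c hm

lemma pvU_nodup (relation : List (List String)) : (pvU relation).Nodup := by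
  unfold pvU
  apply List.Nodup.filter
  rw [pvCol_natCast]
  exact pvL_nodup _

lemma pvCond_eq (x y : List Int) (hx : x.Nodup) :
    (PySem.List.len x ==
        PySem.Set.len (PySem.Set.inter (PySem.Set.ofList x) (PySem.Set.ofList y)))
      = pvSub x y := by
  have hdef : PySem.Set.inter (PySem.Set.ofList x) (PySem.Set.ofList y)
      = x.filter (fun a => PySem.Set.contains (PySem.Set.ofList y) a) := by
    rw [PySem.Set.ofList_eq_self_of_nodup x hx]; rfl
  rw [hdef, Bool.eq_iff_iff, pvSub, PySem.Set.issubset_iff]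
  simp only [PySem.List.len_eq, PySem.Set.len, beq_iff_eq, Nat.cast_inj]
  constructor
  · intro h a ha
    have := List.length_filter_eq_length_iff.mp h.symm a ha
    exact (PySem.Set.mem_ofList _ _).mp ((PySem.Set.contains_iff _ _).mp this)
  · intro h
    symm
    rw [List.length_filter_eq_length_iff]
    intro a ha
    exact (PySem.Set.contains_iff _ _).mpr ((PySem.Set.mem_ofList _ _).mpr (h a ha))

lemma pvAll_keep (U : List (List Int)) (hels : ∀ c ∈ U, c.Nodup) (z : List Int) :
    ((PySem.List.pyRange 0 (PySem.List.len U) 1).all (fun i =>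
        (PySem.List.pyRange (i + 1) (PySem.List.len U) 1).all (fun j =>
          !(PySem.List.len (PySem.List.pyGetD U i []) ==
              PySem.Set.len (PySem.Set.inter
                (PySem.Set.ofList (PySem.List.pyGetD U i []))
                (PySem.Set.ofList (PySem.List.pyGetD U j [])))) ||
          !(z == PySem.List.pyGetD U j []))))
      = pvKeepB U z := by
  have hget : ∀ i : Int, 0 ≤ i → PySem.List.pyGetD U i ([] : List Int) = U.getD i.toNat [] :=
    fun i h0 => PySem.List.pyGetD_of_nonneg U [] h0
  have hndA : ∀ p : Nat, p < U.length → (U.getD p ([] : List Int)).Nodup := by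
    intro p hp
    rw [List.getD_eq_getElem _ _ hp]
    exact hels _ (List.getElem_mem hp)
  rw [Bool.eq_iff_iff, pvKeepB_iff, PySem.List.len_eq]
  simp only [List.all_eq_true, PySem.List.mem_pyRange_one, Bool.or_eq_true, Bool.not_eq_true',
    beq_eq_false_iff_ne]
  constructor
  · intro h q hq p hpq hsub heq
    have hp := h (p : Int) ⟨Int.natCast_nonneg p, by exact_mod_cast lt_trans hpq hq⟩
      (q : Int) ⟨by exact_mod_cast hpq, by exact_mod_cast hq⟩
    rw [hget (p : Int) (Int.natCast_nonneg p), hget (q : Int) (Int.natCast_nonneg q)] at hp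
    simp only [Int.toNat_natCast] at hp
    rcases hp with hfalse | hne
    · refine absurd (beq_iff_eq.mp ?_) hfalse
      rw [pvCond_eq _ _ (hndA p (lt_trans hpq hq))]
      exact hsub
    · exact hne heq.symm
  · intro h i hi j hj
    obtain ⟨hi0, hin⟩ := hi
    obtain ⟨hji, hjn⟩ := hj
    have hj0 : (0 : Int) ≤ j := by omega
    have hiN : i.toNat < U.length := by omega
    have hjN : j.toNat < U.length := by omega
    by_cases hsub : pvSub (U.getD i.toNat []) (U.getD j.toNat []) = true
    · right
      rw [hget j hj0]
      exact fun e => h j.toNat hjN i.toNat (by omega) hsub e.symm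
    · left
      rw [hget i hi0, hget j hj0]
      intro he
      exact hsub (by rw [← pvCond_eq _ _ (hndA i.toNat hiN)]; exact beq_iff_eq.mpr he)

lemma pvKeep_head (seen : List (List Int)) (c : List Int) (rest : List (List Int))
    (hnd : (seen ++ c :: rest).Nodup) :
    (pvKeepB (seen ++ c :: rest) c = true) ↔ ∀ x ∈ seen, pvSub x c = false := by
  have hlen : seen.length < (seen ++ c :: rest).length := by
    simp only [List.length_append, List.length_cons]; omega
  have hgetc : (seen ++ c :: rest).getD seen.length [] = c := by
    rw [List.getD_eq_getElem _ _ hlen, List.getElem_append_right (le_refl _)]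
    simp
  rw [pvKeepB_iff]
  constructor
  · intro h x hx
    rcases List.mem_iff_getElem.mp hx with ⟨p, hp, rfl⟩
    by_contra hcon
    have hplen : p < (seen ++ c :: rest).length := by
      simp only [List.length_append, List.length_cons]; omega
    have hsub : pvSub ((seen ++ c :: rest).getD p [])
        ((seen ++ c :: rest).getD seen.length []) = true := by
      rw [hgetc, List.getD_eq_getElem _ _ hplen, List.getElem_append_left hp]
      simpa using hcon
    exact h seen.length hlen p hp hsub hgetc
  · intro h q hq p hpq hsub heq
    have hceq : (seen ++ c :: rest)[q]'hq = c := by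
      rw [← List.getD_eq_getElem _ ([] : List Int) hq]; exact heq
    have hq0' : (seen ++ c :: rest)[seen.length]'hlen = c := by
      rw [← List.getD_eq_getElem _ ([] : List Int) hlen]; exact hgetc
    have hqeq : q = seen.length := by
      have := (List.Nodup.getElem_inj_iff hnd (hi := hq) (hj := hlen)).mp
        (by rw [hceq, hq0'])
      exact this
    subst hqeq
    have hplt : p < seen.length := hpq
    have hgetp : (seen ++ c :: rest).getD p [] = seen[p] := by
      rw [List.getD_eq_getElem _ _ (by simp only [List.length_append, List.length_cons]; omega),
        List.getElem_append_left hplt]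
    rw [hgetp, hgetc] at hsub
    have := h seen[p] (List.getElem_mem hplt)
    rw [hsub] at this
    cases this

lemma pvFilter_keep (rest : List (List Int)) : ∀ (seen : List (List Int)),
    (seen ++ rest).Nodup →
    (rest.filter (pvKeepB (seen ++ rest))).length = pvH seen rest := by
  induction rest with
  | nil => intro seen _; simp [pvH]
  | cons c rest ih =>
    intro seen hnd
    have hassoc : seen ++ c :: rest = (seen ++ [c]) ++ rest := by simp
    rw [List.filter_cons]
    by_cases hacc : seen.any (fun x => pvSub x c) = true
    · have hkeep : pvKeepB (seen ++ c :: rest) c = false := by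
        rw [← Bool.not_eq_true]
        intro hk
        rcases List.any_eq_true.mp hacc with ⟨x, hx, hsub⟩
        have := (pvKeep_head seen c rest hnd).mp hk x hx
        rw [hsub] at this; cases this
      rw [if_neg (by simp [hkeep])]
      rw [hassoc] at hnd ⊢
      rw [ih (seen ++ [c]) hnd]
      simp only [pvH]
      rw [if_pos hacc]
      omega
    · have hkeep : pvKeepB (seen ++ c :: rest) c = true := by
        rw [pvKeep_head seen c rest hnd]
        intro x hx
        by_contra hcon
        exact hacc (List.any_eq_true.mpr ⟨x, hx, by simpa using hcon⟩)
      rw [if_pos hkeep, List.length_cons]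
      rw [hassoc] at hnd ⊢
      rw [ih (seen ++ [c]) hnd]
      simp only [pvH]
      rw [if_neg hacc]
      omega

lemma pvA_eq (relation : List (List String)) :
    solution relation = ((pvH [] (pvU relation) : Nat) : Int) := by
  simp only [solution]
  rw [PySem.List.foldl_append_eq_flatMap, List.nil_append]
  rw [pvFoldl_filter_step]
  rw [PySem.List.foldl_append_singleton, List.nil_append]
  rw [(show (PySem.List.pyRange 1 (PySem.List.len (PySem.List.pyGetD relation 0 []) + 1) 1).flatMap
        (fun i => PySem.List.combinations
          (PySem.List.pyRange 0 (PySem.List.len (PySem.List.pyGetD relation 0 [])) 1) i.toNat)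
      = pvL (pvCol relation) from rfl)]
  rw [(show (fun candi => PySem.Set.len (PySem.Set.ofList (relation.map
        (fun item => candi.map (fun i => PySem.List.pyGetD item i "")))) == PySem.List.len relation)
      = pvUniq relation from rfl)]
  rw [(show (pvL (pvCol relation)).filter (pvUniq relation) = pvU relation from rfl)]
  rw [PySem.Set.ofList_eq_self_of_nodup _ (pvU_nodup relation)]
  simp only [pvFoldl_discard]
  simp only [pvFoldl_filter_all]
  rw [List.filter_congr (fun z _ => pvAll_keep (pvU relation) (pvU_elem_nodup relation) z)]
  simp only [PySem.Set.len]
  have := pvFilter_keep (pvU relation) [] (by simpa using pvU_nodup relation)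
  simp only [List.nil_append] at this
  exact_mod_cast this

-- ---------------------------------------------------------------- shared semantic layer

-- a subset between two strictly increasing lists is a sublist
lemma pvSublist_of_subset : ∀ (c x : List Int), x.Pairwise (· < ·) → c.Pairwise (· < ·) →
    (∀ a ∈ x, a ∈ c) → x.Sublist c := by
  intro c
  induction c with
  | nil =>
    intro x _ _ hsub
    cases x with
    | nil => exact List.Sublist.refl _
    | cons a x => exact absurd (hsub a List.mem_cons_self) (List.not_mem_nil)
  | cons b c ih =>
    intro x hx hc hsub
    cases x with
    | nil => exact List.nil_sublist _
    | cons a x =>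
      rcases List.pairwise_cons.mp hx with ⟨ha, hx'⟩
      rcases List.pairwise_cons.mp hc with ⟨hb, hc'⟩
      by_cases hab : a = b
      · subst hab
        refine List.Sublist.cons₂ a (ih x hx' hc' ?_)
        intro e he
        rcases List.mem_cons.mp (hsub e (List.mem_cons_of_mem _ he)) with rfl | he'
        · exact absurd (ha e he) (lt_irrefl e)
        · exact he'
      · have hac : a ∈ c := by
          rcases List.mem_cons.mp (hsub a List.mem_cons_self) with h' | h'
          · exact absurd h' hab
          · exact h'
        have hba : b < a := hb a hac
        have hmem : ∀ e ∈ a :: x, e ∈ c := by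
          intro e he
          rcases List.mem_cons.mp (hsub e he) with hbe | he'
          · exfalso
            rcases List.mem_cons.mp he with rfl | hex
            · exact hab hbe
            · have h1 := ha e hex
              rw [hbe] at h1
              exact absurd (lt_trans hba h1) (lt_irrefl b)
          · exact he'
        exact List.Sublist.cons b (ih _ hx hc' hmem)

-- strict subset (as sets) of sorted subsets gives strictly smaller length
lemma pvLen_lt_of_strict_subset (n : Nat) (x c : List Int)
    (hxR : x.Sublist (pvR (n : Int))) (hcR : c.Sublist (pvR (n : Int)))
    (hsub : pvSub x c = true) (hne : x ≠ c) : x.length < c.length := by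
  have hRsorted : (pvR (n : Int)).Pairwise (· < ·) := by
    rw [pvR]; exact PySem.List.pairwise_lt_pyRange_one 0 (↑n)
  have hxs : x.Pairwise (· < ·) := hRsorted.sublist hxR
  have hcs : c.Pairwise (· < ·) := hRsorted.sublist hcR
  have hxc : x.Sublist c :=
    pvSublist_of_subset c x hxs hcs ((PySem.Set.issubset_iff x c).mp hsub)
  rcases Nat.lt_or_ge x.length c.length with h | h
  · exact h
  · exact absurd (hxc.eq_of_length (le_antisymm hxc.length_le h)) hne

-- pvH of a nodup, length-monotone list of sorted subsets counts the elements with no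
-- strict subset anywhere in the list (a global, order-free characterisation)
lemma pvH_global (n : Nat) (V : List (List Int)) (hnd : V.Nodup)
    (hmono : V.Pairwise (fun a b => a.length ≤ b.length))
    (hsubl : ∀ c ∈ V, c.Sublist (pvR (n : Int))) :
    pvH [] V = V.countP (fun c => !(V.any (fun x => pvSub x c && !(x == c)))) := by
  suffices h : ∀ (rest seen : List (List Int)), seen ++ rest = V →
      pvH seen rest = rest.countP (fun c => !(V.any (fun x => pvSub x c && !(x == c)))) by
    exact h V [] rfl
  intro rest
  induction rest with
  | nil => intro seen _; simp [pvH]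
  | cons c rest ih =>
    intro seen hV
    have hmem_c : c ∈ V := by rw [← hV]; exact List.mem_append_right _ List.mem_cons_self
    have hkey : (seen.any (fun x => pvSub x c) = true)
        ↔ (V.any (fun x => pvSub x c && !(x == c)) = true) := by
      constructor
      · intro h
        rcases List.any_eq_true.mp h with ⟨x, hx, hsub⟩
        have hxV : x ∈ V := by rw [← hV]; exact List.mem_append_left _ hx
        have hne : x ≠ c := by
          intro rfl_eq
          subst rfl_eq
          rw [← hV] at hnd
          rcases List.nodup_append.mp hnd with ⟨_, _, hdisj⟩
          exact hdisj _ hx _ List.mem_cons_self rfl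
        exact List.any_eq_true.mpr ⟨x, hxV, by simp [hsub, hne]⟩
      · intro h
        rcases List.any_eq_true.mp h with ⟨x, hxV, hx⟩
        rw [Bool.and_eq_true, Bool.not_eq_true', beq_eq_false_iff_ne] at hx
        obtain ⟨hsub, hne⟩ := hx
        have hlt : x.length < c.length :=
          pvLen_lt_of_strict_subset n x c (hsubl x hxV) (hsubl c hmem_c) hsub hne
        have hxseen : x ∈ seen := by
          rw [← hV] at hxV
          rcases List.mem_append.mp hxV with h' | h'
          · exact h'
          · rcases List.mem_cons.mp h' with rfl | h''
            · exact absurd rfl hne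
            · -- x comes after c in V, so c.length ≤ x.length, contradicting hlt
              exfalso
              rw [← hV] at hmono
              have hpw : (c :: rest).Pairwise (fun a b => a.length ≤ b.length) :=
                hmono.sublist (List.sublist_append_right _ _)
              exact absurd hlt (not_lt.mpr ((List.pairwise_cons.mp hpw).1 x h''))
        exact List.any_eq_true.mpr ⟨x, hxseen, hsub⟩
    rw [List.countP_cons]
    rw [← ih (seen ++ [c]) (by simpa using hV)]
    simp only [pvH]
    by_cases hacc : seen.any (fun x => pvSub x c) = true
    · rw [if_pos hacc, if_neg (by simp [hkey.mp hacc])]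
      omega
    · have : V.any (fun x => pvSub x c && !(x == c)) = false := by
        rw [← Bool.not_eq_true]; intro hcon; exact hacc (hkey.mpr hcon)
      rw [if_neg hacc, if_pos (by simp [this])]
      omega

-- set(xs) keeps a sublist of xs (first occurrences in order)
lemma pvOfList_sublist {α : Type} [BEq α] [LawfulBEq α] (xs : List α) :
    (PySem.Set.ofList xs).Sublist xs := by
  induction xs with
  | nil => simp [PySem.Set.ofList_nil]
  | cons x xs ih =>
    rw [PySem.Set.ofList_cons]
    exact List.Sublist.cons₂ x (List.Sublist.trans List.filter_sublist ih)

-- len(set(xs)) == len(xs) exactly when xs has no duplicates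
lemma pvSetLen_iff_nodup {α : Type} [BEq α] [LawfulBEq α] (xs : List α) :
    (PySem.Set.len (PySem.Set.ofList xs) == (xs.length : Int)) = true ↔ xs.Nodup := by
  show ((((PySem.Set.ofList xs).length : Int)) == (xs.length : Int)) = true ↔ _
  rw [beq_iff_eq, Int.natCast_inj]
  constructor
  · intro h
    have := (pvOfList_sublist xs).eq_of_length h
    rw [← this]
    exact PySem.Set.nodup_ofList xs
  · intro h
    rw [PySem.Set.ofList_eq_self_of_nodup xs h]

-- uniqueness of the projection = the candidate hits every pairwise difference
lemma pvUniq_iff_hits (relation : List (List String)) (candi : List Int) :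
    pvUniq relation candi = true ↔
      pvHits relation candi := by
  unfold pvUniq pvHits
  rw [PySem.List.len_eq]
  have hlen : ((relation.length : Nat) : Int)
      = (((relation.map (fun item => candi.map (fun i => PySem.List.pyGetD item i ""))).length : Nat) : Int) := by
    simp
  rw [hlen, pvSetLen_iff_nodup]
  rw [List.Nodup, List.pairwise_map, List.pairwise_iff_getElem]
  constructor
  · intro h b hb a hab
    have hne := h a b (lt_trans hab hb) hb hab
    rw [Ne, List.map_inj_left] at hne
    push Not at hne
    rcases hne with ⟨c, hc, hcne⟩
    refine ⟨c, hc, ?_⟩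
    rw [List.getD_eq_getElem _ _ (lt_trans hab hb), List.getD_eq_getElem _ _ hb]
    exact hcne
  · intro h a b ha hb hab
    rcases h b hb a hab with ⟨c, hc, hcne⟩
    rw [List.getD_eq_getElem _ _ ha, List.getD_eq_getElem _ _ hb] at hcne
    rw [Ne, List.map_inj_left]
    push Not
    exact ⟨c, hc, hcne⟩

-- ---------------------------------------------------------------- B-side machinery

-- the difference set of rows a and b, and the dedup-accumulated diffs list of B
def pvDL (relation : List (List String)) (a b : Int) : List Int :=
  (PySem.List.pyRange 0 (pvCol relation) 1).filter (fun c =>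
    !(PySem.List.pyGetD (PySem.List.pyGetD relation a []) c "" ==
      PySem.List.pyGetD (PySem.List.pyGetD relation b []) c ""))

def pvDiffs (relation : List (List String)) : List (List Int) :=
  (PySem.List.pyRange 0 (PySem.List.len relation) 1).foldl (fun diffs a =>
      (PySem.List.pyRange (a + 1) (PySem.List.len relation) 1).foldl
        (fun diffs b => if diffs.contains (pvDL relation a b) then diffs
          else diffs ++ [pvDL relation a b]) diffs) []

lemma pvMem_diffs (relation : List (List String)) (y : List Int) :
    y ∈ pvDiffs relation ↔
      ∃ a ∈ PySem.List.pyRange 0 (PySem.List.len relation) 1,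
        ∃ b ∈ PySem.List.pyRange (a + 1) (PySem.List.len relation) 1,
          y = pvDL relation a b := by
  have hstep : ∀ (a : Int), (fun (diffs : List (List Int)) (b : Int) =>
      if diffs.contains (pvDL relation a b) then diffs else diffs ++ [pvDL relation a b])
      = (fun diffs b => PySem.Set.add diffs (pvDL relation a b)) := fun _ => rfl
  suffices h : ∀ (I : List Int) (s : List (List Int)),
      (y ∈ I.foldl (fun diffs a =>
        (PySem.List.pyRange (a + 1) (PySem.List.len relation) 1).foldl
          (fun diffs b => if diffs.contains (pvDL relation a b) then diffs
            else diffs ++ [pvDL relation a b]) diffs) s)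
        ↔ y ∈ s ∨ ∃ a ∈ I, ∃ b ∈ PySem.List.pyRange (a + 1) (PySem.List.len relation) 1,
            y = pvDL relation a b by
    rw [pvDiffs, h]
    simp
  intro I
  induction I with
  | nil => intro s; simp
  | cons a I ih =>
    intro s
    rw [List.foldl_cons, ih, hstep a, PySem.Set.mem_foldl_add]
    constructor
    · rintro ((hy | ⟨b, hb, rfl⟩) | ⟨a', ha', b, hb, rfl⟩)
      · exact Or.inl hy
      · exact Or.inr ⟨a, List.mem_cons_self, b, hb, rfl⟩
      · exact Or.inr ⟨a', List.mem_cons_of_mem _ ha', b, hb, rfl⟩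
    · rintro (hy | ⟨a', ha', b, hb, rfl⟩)
      · exact Or.inl (Or.inl hy)
      · rcases List.mem_cons.mp ha' with rfl | ha''
        · exact Or.inl (Or.inr ⟨b, hb, rfl⟩)
        · exact Or.inr ⟨a', ha'', b, hb, rfl⟩

-- hitting the deduplicated difference sets = the semantic key predicate
lemma pvBHits_iff (relation : List (List String)) (cols : List Int)
    (hcols : ∀ c ∈ cols, c ∈ pvR (pvCol relation)) :
    (bHits (pvDiffs relation) cols = true) ↔ pvHits relation cols := by
  rw [bHits, List.all_eq_true]
  constructor
  · intro h B hB A hAB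
    have hmem : pvDL relation ((A : Nat) : Int) ((B : Nat) : Int) ∈ pvDiffs relation := by
      rw [pvMem_diffs]
      refine ⟨((A : Nat) : Int), ?_, ((B : Nat) : Int), ?_, rfl⟩
      · rw [PySem.List.mem_pyRange_one, PySem.List.len_eq]
        constructor
        · exact Int.natCast_nonneg A
        · exact_mod_cast lt_trans hAB hB
      · rw [PySem.List.mem_pyRange_one, PySem.List.len_eq]
        constructor
        · exact_mod_cast hAB
        · exact_mod_cast hB
    rcases List.any_eq_true.mp (h _ hmem) with ⟨c, hc, hcd⟩
    have hcd' := List.mem_filter.mp (List.contains_iff_mem.mp hcd)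
    refine ⟨c, hc, ?_⟩
    have e1 : PySem.List.pyGetD relation ((A : Nat) : Int) ([] : List String)
        = relation.getD A [] := by
      rw [PySem.List.pyGetD_of_nonneg relation [] (Int.natCast_nonneg A), Int.toNat_natCast]
    have e2 : PySem.List.pyGetD relation ((B : Nat) : Int) ([] : List String)
        = relation.getD B [] := by
      rw [PySem.List.pyGetD_of_nonneg relation [] (Int.natCast_nonneg B), Int.toNat_natCast]
    have := hcd'.2
    rw [e1, e2] at this
    simpa using this
  · intro h d hd
    rw [pvMem_diffs] at hd
    rcases hd with ⟨a, ha, b, hb, rfl⟩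
    rw [PySem.List.mem_pyRange_one, PySem.List.len_eq] at ha hb
    have ha0 : 0 ≤ a := ha.1
    have hb0 : 0 ≤ b := le_trans (by omega) hb.1
    have hbn : b.toNat < relation.length := by omega
    have hab : a.toNat < b.toNat := by omega
    rcases h b.toNat hbn a.toNat hab with ⟨c, hc, hne⟩
    refine List.any_eq_true.mpr ⟨c, hc, ?_⟩
    rw [List.contains_iff_mem, pvDL]
    refine List.mem_filter.mpr ⟨hcols c hc, ?_⟩
    rw [PySem.List.pyGetD_of_nonneg relation [] ha0, PySem.List.pyGetD_of_nonneg relation [] hb0]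
    simpa using hne

-- a nested counted fold is a countP of the flattened candidate list
lemma pvCount_fold (sizes : List Int) (block : Int → List (List Int))
    (p : Int → List Int → Bool) (q : List Int → Bool)
    (hpq : ∀ s ∈ sizes, ∀ c ∈ block s, p s c = q c) :
    ∀ init : Int,
      sizes.foldl (fun acc s => (block s).foldl
          (fun acc c => if p s c then acc + 1 else acc) acc) init
        = init + ((sizes.flatMap block).countP q : Int) := by
  induction sizes with
  | nil => intro init; simp
  | cons s sizes ih =>
    intro init
    rw [List.foldl_cons]
    have hin : (block s).foldl (fun acc c => if p s c then acc + 1 else acc) init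
        = init + ((block s).countP q : Int) := by
      rw [PySem.List.foldl_if_add_one]
      have := List.countP_congr (l := block s) (p := p s) (q := q)
        (fun c hc => by rw [hpq s List.mem_cons_self c hc])
      rw [this]
    rw [hin, ih (fun s' hs' c hc => hpq s' (List.mem_cons_of_mem _ hs') c hc)]
    rw [List.flatMap_cons, List.countP_append]
    push_cast
    ring

-- B's result as a count over the same candidate list
lemma pvB_eq (relation : List (List String)) :
    solution_alt relation
      = (((pvL (pvCol relation)).countP (fun candi =>
            pvHitsB relation candi &&
            candi.all (fun c =>
              (candi.length == 1) ||
              !(pvHitsB relation (candi.filter (fun x => !(x == c))))) ) : Nat) : Int) := by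
  show (PySem.List.pyRange 1 (pvCol relation + 1) 1).foldl (fun count size =>
      (PySem.List.combinations (PySem.List.pyRange 0 (pvCol relation) 1) size.toNat).foldl
        (fun count candi =>
          if bHits (pvDiffs relation) candi &&
              candi.all (fun c =>
                (size == 1) || !(bHits (pvDiffs relation) (candi.filter (fun x => !(x == c)))))
          then count + 1 else count) count) 0 = _
  rw [pvCount_fold (q := (fun candi =>
            pvHitsB relation candi &&
            candi.all (fun c =>
              (candi.length == 1) ||
              !(pvHitsB relation (candi.filter (fun x => !(x == c)))))))]
  · rw [(show (PySem.List.pyRange 1 (pvCol relation + 1) 1).flatMap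
        (fun i => PySem.List.combinations (PySem.List.pyRange 0 (pvCol relation) 1) i.toNat)
        = pvL (pvCol relation) from rfl)]
    ring
  · intro size hsize candi hcandi
    rw [PySem.List.mem_pyRange_one] at hsize
    rw [PySem.List.mem_combinations_iff] at hcandi
    obtain ⟨hsubl, hlen⟩ := hcandi
    have hcsub : ∀ c ∈ candi, c ∈ pvR (pvCol relation) := fun c hc => hsubl.subset hc
    congr 1
    · rw [Bool.eq_iff_iff, pvHitsB_iff]
      exact pvBHits_iff relation candi hcsub
    · have hcomp : ∀ c ∈ candi,
          ((size == 1) || !(bHits (pvDiffs relation) (candi.filter (fun x => !(x == c)))))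
          = ((candi.length == 1) ||
              !(pvHitsB relation (candi.filter (fun x => !(x == c))))) := by
        intro c _
        congr 1
        · rw [Bool.eq_iff_iff, beq_iff_eq, beq_iff_eq]
          omega
        · congr 1
          rw [Bool.eq_iff_iff, pvHitsB_iff]
          exact pvBHits_iff relation _
            (fun x hx => hcsub x (List.mem_of_mem_filter hx))
      rw [Bool.eq_iff_iff, List.all_eq_true, List.all_eq_true]
      constructor <;> intro h c hc
      · rw [← hcomp c hc]; exact h c hc
      · rw [hcomp c hc]; exact h c hc

-- ---------------------------------------------------------------- predicate equivalence

lemma pvHits_mono (relation : List (List String)) (cols cols' : List Int)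
    (hsub : ∀ c ∈ cols, c ∈ cols') : pvHits relation cols → pvHits relation cols' := by
  intro h b hb a hab
  rcases h b hb a hab with ⟨c, hc, hne⟩
  exact ⟨c, hsub c hc, hne⟩

lemma pvR_length (n : Nat) : (pvR (n : Int)).length = n := by
  rw [pvR, PySem.List.pyRange_zero_natCast, List.length_map, List.length_range]

lemma pvL_elem_len (n : Nat) : ∀ c ∈ pvL (n : Int), 1 ≤ c.length ∧ c.length ≤ n := by
  intro c hc
  rcases List.mem_flatMap.mp hc with ⟨i, hi, hci⟩
  rw [PySem.List.mem_pyRange_one] at hi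
  have hlen := PySem.List.length_of_mem_combinations hci
  have hsub := PySem.List.sublist_of_mem_combinations hci
  have hle := hsub.length_le
  rw [pvR_length] at hle
  constructor
  · omega
  · exact hle

lemma pvMem_pvL (n : Nat) (c : List Int) (hs : c.Sublist (pvR (n : Int)))
    (h1 : 1 ≤ c.length) (h2 : c.length ≤ n) : c ∈ pvL (n : Int) := by
  refine List.mem_flatMap.mpr ⟨((c.length : Nat) : Int), ?_, ?_⟩
  · rw [PySem.List.mem_pyRange_one]
    constructor
    · exact_mod_cast h1
    · omega
  · rw [PySem.List.mem_combinations_iff]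
    exact ⟨hs, by rw [Int.toNat_natCast]⟩

-- A's minimality (no strict unique subset in the candidate pool) = B's local minimality
lemma pvMin_eq (relation : List (List String)) (candi : List Int)
    (hc : candi ∈ pvU relation) :
    (!((pvU relation).any (fun x => pvSub x candi && !(x == candi))))
      = candi.all (fun c => ((candi.length == 1) : Bool)
          || !(pvHitsB relation (candi.filter (fun x => !(x == c))))) := by
  have hRsorted : (pvR (pvCol relation)).Pairwise (· < ·) := by
    rw [pvR]; exact PySem.List.pairwise_lt_pyRange_one 0 (pvCol relation)
  have hcL0 : candi ∈ pvL (pvCol relation) := List.mem_of_mem_filter hc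
  have hcL : candi ∈ pvL (((PySem.List.pyGetD relation 0 []).length : Nat) : Int) := by
    rwa [pvCol_natCast] at hcL0
  have hcand_sub : candi.Sublist (pvR (pvCol relation)) := by
    rw [pvCol_natCast]
    exact pvL_elem_sublist _ candi hcL
  have hcand_nd : candi.Nodup := pvL_elem_nodup _ candi hcL
  have hlen := pvL_elem_len _ candi hcL
  rw [Bool.eq_iff_iff, Bool.not_eq_true', List.all_eq_true]
  constructor
  · intro hA c hcc
    by_cases h1 : candi.length = 1
    · rw [Bool.or_eq_true]; left; rw [beq_iff_eq]; exact h1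
    · rw [Bool.or_eq_true]
      right
      rw [Bool.not_eq_true', pvHitsB_false_iff]
      intro hhits
      have hfl : (candi.filter (fun x => !(x == c))).length = candi.length - 1 := by
        have e : (fun (x : Int) => !(x == c)) = (fun x => x != c) := rfl
        rw [e, ← List.Nodup.erase_eq_filter hcand_nd c]
        exact List.length_erase_of_mem hcc
      have hfsub : (candi.filter (fun x => !(x == c))).Sublist candi := List.filter_sublist
      have hfL : candi.filter (fun x => !(x == c)) ∈ pvL (pvCol relation) := by
        rw [pvCol_natCast]
        refine pvMem_pvL _ _ (hfsub.trans (by rwa [pvCol_natCast] at hcand_sub)) ?_ ?_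
        · omega
        · have := (pvL_elem_len _ candi hcL).2; omega
      have hfU : candi.filter (fun x => !(x == c)) ∈ pvU relation :=
        List.mem_filter.mpr ⟨hfL, (pvUniq_iff_hits relation _).mpr hhits⟩
      have hfsubset : pvSub (candi.filter (fun x => !(x == c))) candi = true :=
        (PySem.Set.issubset_iff _ _).mpr (fun a ha => List.mem_of_mem_filter ha)
      have hfne : candi.filter (fun x => !(x == c)) ≠ candi := by
        intro e
        rw [e] at hfl
        omega
      have hany : (pvU relation).any (fun x => pvSub x candi && !(x == candi)) = true :=
        List.any_eq_true.mpr ⟨_, hfU, by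
          rw [Bool.and_eq_true, Bool.not_eq_true', beq_eq_false_iff_ne]
          exact ⟨hfsubset, hfne⟩⟩
      rw [hA] at hany
      cases hany
  · intro hB
    rw [List.any_eq_false]
    intro x hxU
    cases hxt : (pvSub x candi && !(x == candi)) with
    | false => simp
    | true =>
      exfalso
      rw [Bool.and_eq_true, Bool.not_eq_true', beq_eq_false_iff_ne] at hxt
      obtain ⟨hxsub, hxne⟩ := hxt
      have hxL : x ∈ pvL (((PySem.List.pyGetD relation 0 []).length : Nat) : Int) := by
        have := List.mem_of_mem_filter hxU
        rwa [pvCol_natCast] at this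
      have hxsubl : x.Sublist (pvR (pvCol relation)) := by
        rw [pvCol_natCast]
        exact pvL_elem_sublist _ x hxL
      have hxlt : x.length < candi.length := by
        have h1 : x.Sublist (pvR (((PySem.List.pyGetD relation 0 []).length : Nat) : Int)) := by
          rwa [pvCol_natCast] at hxsubl
        have h2 : candi.Sublist (pvR (((PySem.List.pyGetD relation 0 []).length : Nat) : Int)) := by
          rwa [pvCol_natCast] at hcand_sub
        exact pvLen_lt_of_strict_subset _ x candi h1 h2 hxsub hxne
      have hxlen := pvL_elem_len _ x hxL
      have hex : ∃ c ∈ candi, c ∉ x := by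
        by_contra hno
        push Not at hno
        have hsublx : candi.Sublist x :=
          pvSublist_of_subset x candi (hRsorted.sublist hcand_sub)
            (hRsorted.sublist hxsubl) hno
        have := hsublx.length_le
        omega
      rcases hex with ⟨c, hcc, hcnx⟩
      have hBc := hB c hcc
      rw [Bool.or_eq_true] at hBc
      rcases hBc with h1 | h2
      · rw [beq_iff_eq] at h1
        omega
      · rw [Bool.not_eq_true', pvHitsB_false_iff] at h2
        apply h2
        have hxhits : pvHits relation x :=
          (pvUniq_iff_hits relation x).mp (List.mem_filter.mp hxU).2
        refine pvHits_mono relation x _ ?_ hxhits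
        intro a ha
        refine List.mem_filter.mpr ⟨(PySem.Set.issubset_iff x candi).mp hxsub a ha, ?_⟩
        have : a ≠ c := fun e => hcnx (e ▸ ha)
        simpa using this

-- ===== VERDICT (by name: the statement is the Claim_ definition above) =====
theorem solution_spec : Claim_equal_solution := by
  intro relation _ _
  show solution relation = solution_alt relation
  rw [pvA_eq, pvB_eq]
  rw [Int.natCast_inj]
  have hUL : pvU relation
      = (pvL (((PySem.List.pyGetD relation 0 []).length : Nat) : Int)).filter
          (pvUniq relation) := by
    rw [pvU, pvCol_natCast]
  have hglob : pvH [] (pvU relation)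
      = (pvU relation).countP
          (fun c => !((pvU relation).any (fun x => pvSub x c && !(x == c)))) := by
    refine pvH_global ((PySem.List.pyGetD relation 0 []).length) (pvU relation)
      (pvU_nodup relation) ?_ ?_
    · rw [hUL]
      exact (pvL_len_mono _).sublist List.filter_sublist
    · intro c hc
      rw [hUL] at hc
      exact pvL_elem_sublist _ c (List.mem_of_mem_filter hc)
  rw [hglob]
  -- rewrite B's count through pvUniq and restrict to pvU
  have hcongr1 : (pvL (pvCol relation)).countP (fun candi =>
        pvHitsB relation candi &&
        candi.all (fun c =>
          (candi.length == 1) ||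
          !(pvHitsB relation (candi.filter (fun x => !(x == c))))))
      = (pvL (pvCol relation)).countP (fun candi =>
        (candi.all (fun c =>
          (candi.length == 1) ||
          !(pvHitsB relation (candi.filter (fun x => !(x == c)))))) &&
        pvUniq relation candi) := by
    refine List.countP_congr ?_
    intro candi _
    have he : pvHitsB relation candi = pvUniq relation candi := by
      rw [Bool.eq_iff_iff, pvHitsB_iff]
      exact (pvUniq_iff_hits relation candi).symm
    rw [he, Bool.and_comm]
  rw [hcongr1, ← List.countP_filter]
  rw [(show (pvL (pvCol relation)).filter (pvUniq relation) = pvU relation from rfl)]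
  refine List.countP_congr ?_
  intro candi hcandi
  rw [pvMin_eq relation candi hcandi]
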